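-- pv_equiv track=rewrite | github.com/Her-dev/algoritmos-y-programacion-1 | Guia/serie6/ej6_2.py | espacio_caracter
-- ===== SOURCE A (Python) =====
-- def espacio_caracter(cadena,caracter):
-- 	"""Dada una cadena con espacios, inserta el caracter en ellos"""
-- 	cadena_final = ""
-- 	for e in cadena:
-- 		if e == " ":
-- 			cadena_final += caracter
-- 			continue
--
-- 		cadena_final += e
--
-- 	return cadena_final
-- ===== SOURCE B (Python) =====
-- def espacio_caracter(cadena, caracter):
--     """Dada una cadena con espacios, inserta el caracter en ellos"""
--     return caracter.join(cadena.split(' '))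
-- ===== Notes on version B (the rewrite author's own statement) =====
-- stated objective: idiomatic
-- what changed: Replaces the character-by-character accumulation loop with split on the single-space delimiter followed by a join with the replacement string.
import Mathlib
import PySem

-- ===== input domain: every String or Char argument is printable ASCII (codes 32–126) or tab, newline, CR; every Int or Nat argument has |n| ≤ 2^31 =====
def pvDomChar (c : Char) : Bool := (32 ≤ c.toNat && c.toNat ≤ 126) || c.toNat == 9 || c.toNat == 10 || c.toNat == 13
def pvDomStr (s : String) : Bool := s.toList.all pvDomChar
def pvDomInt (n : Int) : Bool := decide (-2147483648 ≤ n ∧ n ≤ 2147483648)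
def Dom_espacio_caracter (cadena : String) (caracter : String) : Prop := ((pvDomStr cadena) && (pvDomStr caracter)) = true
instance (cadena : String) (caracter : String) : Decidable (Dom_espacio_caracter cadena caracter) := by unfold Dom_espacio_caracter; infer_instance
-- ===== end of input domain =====

-- B replaces A's character-by-character accumulation loop with an idiomatic split-on-space then join-with-caracter; same cost.

-- ===== PORT A =====
-- literal port of A's loop: accumulate chars, replacing each space by caracter
def espacio_caracter (cadena : String) (caracter : String) : String :=
  String.ofList
    (cadena.toList.foldl
      (fun cadena_final e =>
        if e == ' ' then cadena_final ++ caracter.toList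
        else cadena_final ++ [e])
      [])

-- ===== PORT B =====
-- literal port of B: caracter.join(cadena.split(' '))
def espacio_caracter_alt (cadena : String) (caracter : String) : String :=
  String.ofList (PySem.Chars.join caracter.toList (PySem.Chars.splitOn cadena.toList [' ']))

-- ===== PRECONDITION & SPEC =====
def Spec_espacio_caracter (cadena : String) (caracter : String) (out : String) : Prop := out = espacio_caracter_alt cadena caracter
instance (cadena : String) (caracter : String) (out : String) : Decidable (Spec_espacio_caracter cadena caracter out) := by unfold Spec_espacio_caracter; infer_instance

-- ===== CLAIM (what is proved, stated in full; the proofs are below) =====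
def Claim_equal_espacio_caracter : Prop := ∀ (cadena : String) (caracter : String), Dom_espacio_caracter cadena caracter → Spec_espacio_caracter cadena caracter (espacio_caracter cadena caracter)

-- ===== LEMMAS AND PROOFS =====

-- reference recursive splitter on a single space (proof device only)
def pvSplit1 : List Char → List (List Char)
  | [] => [[]]
  | c :: rest =>
    if c = ' ' then [] :: pvSplit1 rest
    else
      match pvSplit1 rest with
      | [] => [[c]]       -- unreachable
      | h :: t => (c :: h) :: t

-- reference right-recursion for A's result
def pvRepl (sep : List Char) : List Char → List Char
  | [] => []
  | c :: rest => if c = ' ' then sep ++ pvRepl sep rest else c :: pvRepl sep rest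

theorem pvSplit1_ne_nil (l : List Char) : pvSplit1 l ≠ [] := by
  cases l with
  | nil => simp [pvSplit1]
  | cons c rest =>
    simp only [pvSplit1]
    split
    · simp
    · cases h : pvSplit1 rest <;> simp

def pvConsHead (x : List Char) : List (List Char) → List (List Char)
  | [] => [x]
  | h :: t => (x ++ h) :: t

theorem pvGo_eq (fuel : Nat) (l cur : List Char) (acc : List (List Char))
    (hf : l.length ≤ fuel) :
    PySem.Chars.splitOn.go [' '] fuel l cur acc
      = acc.reverse ++ pvConsHead cur.reverse (pvSplit1 l) := by
  induction fuel generalizing l cur acc with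
  | zero =>
    have hl : l = [] := by cases l <;> simp_all
    subst hl
    simp [PySem.Chars.splitOn.go, pvSplit1, pvConsHead]
  | succ fuel ih =>
    cases l with
    | nil => simp [PySem.Chars.splitOn.go, pvSplit1, pvConsHead]
    | cons c rest =>
      rw [PySem.Chars.splitOn.go]
      by_cases hc : c = ' '
      · subst hc
        have hpre : List.isPrefixOf [' '] (' ' :: rest) = true := by
          simp [List.isPrefixOf]
        rw [if_pos hpre]
        have := ih rest [] (cur.reverse :: acc) (by simpa using Nat.le_of_succ_le_succ hf)
        simp only [List.length_cons, List.length_nil, List.drop_succ_cons, List.drop_zero] at this ⊢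
        rw [this]
        obtain ⟨h, t, hht⟩ : ∃ h t, pvSplit1 rest = h :: t := by
          cases hsp : pvSplit1 rest with
          | nil => exact absurd hsp (pvSplit1_ne_nil rest)
          | cons h t => exact ⟨h, t, rfl⟩
        simp [pvSplit1, pvConsHead, hht]
      · have hpre : List.isPrefixOf [' '] (c :: rest) = false := by
          simp [List.isPrefixOf]
          intro h; exact absurd h.symm hc
        rw [if_neg (by simp [hpre])]
        have := ih rest (c :: cur) acc (by simpa using Nat.le_of_succ_le_succ hf)
        rw [this]
        obtain ⟨h, t, hht⟩ : ∃ h t, pvSplit1 rest = h :: t := by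
          cases hsp : pvSplit1 rest with
          | nil => exact absurd hsp (pvSplit1_ne_nil rest)
          | cons h t => exact ⟨h, t, rfl⟩
        simp [pvSplit1, hc, pvConsHead, hht]

theorem pvSplitOn_eq (l : List Char) : PySem.Chars.splitOn l [' '] = pvSplit1 l := by
  rw [PySem.Chars.splitOn, pvGo_eq (l.length + 1) l [] [] (Nat.le_succ _)]
  obtain ⟨h, t, hht⟩ : ∃ h t, pvSplit1 l = h :: t := by
    cases hsp : pvSplit1 l with
    | nil => exact absurd hsp (pvSplit1_ne_nil l)
    | cons h t => exact ⟨h, t, rfl⟩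
  simp [pvConsHead, hht]

theorem pvJoin_split1 (sep : List Char) (l : List Char) :
    PySem.Chars.join sep (pvSplit1 l) = pvRepl sep l := by
  induction l with
  | nil => simp [pvSplit1, pvRepl, PySem.Chars.join, List.intercalate]
  | cons c rest ih =>
    obtain ⟨h, t, hht⟩ : ∃ h t, pvSplit1 rest = h :: t := by
      cases hsp : pvSplit1 rest with
      | nil => exact absurd hsp (pvSplit1_ne_nil rest)
      | cons h t => exact ⟨h, t, rfl⟩
    by_cases hc : c = ' '
    · subst hc
      simp only [pvSplit1, pvRepl, ← ih, hht]
      simp [PySem.Chars.join, List.intercalate]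
    · simp only [pvSplit1, pvRepl, if_neg hc, ← ih, hht]
      cases t with
      | nil => simp [PySem.Chars.join, List.intercalate, List.intersperse]
      | cons t0 ts => simp [PySem.Chars.join, List.intercalate, List.intersperse]

theorem pvFoldl_eq (sep : List Char) (l acc : List Char) :
    l.foldl (fun cf e => if e == ' ' then cf ++ sep else cf ++ [e]) acc
      = acc ++ pvRepl sep l := by
  induction l generalizing acc with
  | nil => simp [pvRepl]
  | cons c rest ih =>
    rw [List.foldl_cons]
    by_cases hc : c = ' '
    · subst hc; rw [if_pos (by simp), ih]; simp [pvRepl]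
    · rw [if_neg (by simp [hc]), ih]; simp [pvRepl, hc]

-- ===== VERDICT (by name: the statement is the Claim_ definition above) =====
theorem espacio_caracter_spec : Claim_equal_espacio_caracter := by
  intro cadena caracter _
  show _ = _
  unfold espacio_caracter espacio_caracter_alt
  rw [pvSplitOn_eq, pvJoin_split1, pvFoldl_eq]
  simp
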